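-- pv_equiv track=rewrite | github.com/mattiasthalen/dot-organize | specs/001-manifest-builder/research/interactive-wizard-example.py | validate_extensions
-- ===== SOURCE A (Python) =====
-- def validate_extensions(ext_input: str) -> tuple[bool, list[str], str]:
--     """Validate and parse extension input. Returns (is_valid, extensions, error)."""
--     if not ext_input.strip():
--         return False, [], "At least one extension is required"
--
--     # Parse comma or space-separated extensions
--     raw_exts = ext_input.replace(",", " ").split()
--     extensions = []
--
--     for ext in raw_exts:
--         ext = ext.strip().lower()
--         if not ext.startswith("."):
--             ext = f".{ext}"
--
--         # Validate extension format
--         if len(ext) < 2 or not ext[1:].replace("_", "").isalnum():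
--             return False, [], f"Invalid extension: {ext}"
--
--         extensions.append(ext)
--
--     return True, extensions, ""
-- ===== SOURCE B (Python) =====
-- def validate_extensions(ext_input: str) -> tuple[bool, list[str], str]:
--     """Validate and parse extension input. Returns (is_valid, extensions, error)."""
--     if not ext_input.strip():
--         return False, [], "At least one extension is required"
--
--     # Single character-level scan: tokenize, lowercase, normalize and validate
--     # in one pass, tracking flags instead of building strings to re-inspect.
--     exts = []
--     cur = ""          # current token, already lowercased
--     ok = True         # every body char seen so far is alphanumeric or '_'
--     alnum = False     # the body contains at least one alphanumeric char
--     for c in ext_input + " ":          # trailing sentinel flushes the last token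
--         if c.isspace() or c == ",":
--             if cur:
--                 ext = cur if cur[0] == "." else "." + cur
--                 if not (ok and alnum):
--                     return False, [], f"Invalid extension: {ext}"
--                 exts.append(ext)
--                 cur, ok, alnum = "", True, False
--         else:
--             d = c.lower()
--             if cur or d != ".":        # a body char (not the leading dot)
--                 if d.isalnum():
--                     alnum = True
--                 elif d != "_":
--                     ok = False
--             cur += d
--     return True, exts, ""
-- ===== Notes on version B (the rewrite author's own statement) =====
-- stated objective: alternative
-- what changed: A builds intermediate strings (replace commas, split into tokens, then per token strip/lower/prefix-dot and a substring alnum test); B is a single character-level scan with a sentinel that tokenizes, lowercases and validates on the fly via two running flags (all body chars alnum-or-underscore, some body char alnum), never re-inspecting a built token.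
import Mathlib
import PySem

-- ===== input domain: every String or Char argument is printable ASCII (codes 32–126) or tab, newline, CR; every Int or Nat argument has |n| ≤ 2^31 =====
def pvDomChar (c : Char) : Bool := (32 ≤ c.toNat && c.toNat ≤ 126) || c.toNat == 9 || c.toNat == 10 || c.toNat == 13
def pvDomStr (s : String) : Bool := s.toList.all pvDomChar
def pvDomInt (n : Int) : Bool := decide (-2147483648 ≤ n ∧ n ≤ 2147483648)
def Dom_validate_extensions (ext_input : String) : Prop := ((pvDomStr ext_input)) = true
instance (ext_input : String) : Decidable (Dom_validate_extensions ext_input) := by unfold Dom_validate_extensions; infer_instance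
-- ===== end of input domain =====

-- B replaces A's replace/split + per-token normalize/validate loop with a single
-- character-level scan that tokenizes, lowercases and validates via two running flags
-- in one pass over the input; alternative algorithm, same asymptotic cost.


-- ===== PORT A =====
-- A's loop: normalize each raw token (strip, lower, prefix '.'), return an error at the
-- first invalid one, otherwise append it to the accumulator.
def vaLoopA : List String → List String → Bool × List String × String
  | [], extensions => (true, extensions, "")
  | t :: rest, extensions =>
    let e := PySem.Str.lower (PySem.Str.strip t)
    let ext := if !(PySem.Str.startswith e ".") then "." ++ e else e
    if decide (PySem.Str.len ext < 2)
        || !(PySem.Str.strIsalnum (PySem.Str.replace (PySem.Str.slice ext (some 1) none) "_" "")) then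
      (false, [], "Invalid extension: " ++ ext)
    else
      vaLoopA rest (extensions ++ [ext])

def validate_extensions (ext_input : String) : Bool × List String × String :=
  if PySem.Str.strip ext_input = "" then
    (false, [], "At least one extension is required")
  else
    let raw_exts := PySem.Str.split₀ (PySem.Str.replace ext_input "," " ")
    vaLoopA raw_exts []

-- ===== PORT B =====
-- B's scan: one pass over the characters (plus a sentinel space that flushes the last
-- token), keeping the current lowered token `cur` and two flags: `ok` (all body chars
-- alphanumeric or '_') and `al` (some body char alphanumeric).
def vbLoop : List Char → List String → List Char → Bool → Bool → Bool × List String × String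
  | [], exts, _cur, _ok, _al => (true, exts, "")
  | c :: rest, exts, cur, ok, al =>
    if PySem.Chars.isspace c || c == ',' then
      if !cur.isEmpty then
        let ext := if cur.head? == some '.' then cur else '.' :: cur
        if !(ok && al) then
          (false, [], "Invalid extension: " ++ String.ofList ext)
        else
          vbLoop rest (exts ++ [String.ofList ext]) [] true false
      else vbLoop rest exts cur ok al
    else
      let d := PySem.Chars.lowerChar c
      let p : Bool × Bool :=
        if !cur.isEmpty || d != '.' then
          if PySem.Chars.isalnum d then (ok, true)
          else if d == '_' then (ok, al)
          else (false, al)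
        else (ok, al)
      vbLoop rest exts (cur ++ [d]) p.1 p.2

def validate_extensions_alt (ext_input : String) : Bool × List String × String :=
  if PySem.Str.strip ext_input = "" then
    (false, [], "At least one extension is required")
  else
    vbLoop (ext_input.toList ++ [' ']) [] [] true false

-- ===== PRECONDITION & SPEC =====
def Spec_validate_extensions (ext_input : String) (out : Bool × List String × String) : Prop := out = validate_extensions_alt ext_input
instance (ext_input : String) (out : Bool × List String × String) : Decidable (Spec_validate_extensions ext_input out) := by unfold Spec_validate_extensions; infer_instance

-- ===== CLAIM (what is proved, stated in full; the proofs are below) =====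
def Claim_equal_validate_extensions : Prop := ∀ (ext_input : String), Dom_validate_extensions ext_input → Spec_validate_extensions ext_input (validate_extensions ext_input)

-- ===== LEMMAS AND PROOFS =====

-- Common reference machine S: runs over the comma-mapped characters with the pending
-- lowered token `cur`; its per-token check is written in A's form.
def fComma (c : Char) : Char := if c = ',' then ' ' else c

def vBody (cur : List Char) : List Char := if cur.head? == some '.' then cur.tail else cur
def vOk (cur : List Char) : Bool := (vBody cur).all (fun c => PySem.Chars.isalnum c || c == '_')
def vAl (cur : List Char) : Bool := (vBody cur).any PySem.Chars.isalnum

def aBad (ext : List Char) : Bool :=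
  decide ((ext.length : Int) < 2) || !(PySem.Chars.strIsalnum (PySem.Chars.replace ext.tail ['_'] []))

def vS : List Char → List Char → List String → Bool × List String × String
  | [], cur, exts =>
    if cur.isEmpty then (true, exts, "")
    else
      let ext := if PySem.Chars.startswith cur ['.'] then cur else '.' :: cur
      if aBad ext then (false, [], "Invalid extension: " ++ String.ofList ext)
      else (true, exts ++ [String.ofList ext], "")
  | c :: cs, cur, exts =>
    if PySem.Chars.isspace c then
      if cur.isEmpty then vS cs [] exts
      else
        let ext := if PySem.Chars.startswith cur ['.'] then cur else '.' :: cur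
        if aBad ext then (false, [], "Invalid extension: " ++ String.ofList ext)
        else vS cs [] (exts ++ [String.ofList ext])
    else vS cs (cur ++ [PySem.Chars.lowerChar c]) exts

theorem replace_single_go (x : Char) (new : List Char) (fuel : Nat) (l : List Char)
    (acc : List Char) (hf : l.length ≤ fuel) :
    PySem.Chars.replace.go [x] new fuel l acc
      = acc.reverse ++ l.flatMap (fun c => if c = x then new else [c]) := by
  induction fuel generalizing l acc with
  | zero =>
    have : l = [] := by cases l <;> simp_all
    subst this; simp [PySem.Chars.replace.go]
  | succ n ih =>
    cases l with
    | nil => simp [PySem.Chars.replace.go]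
    | cons c t =>
      have hf' : t.length ≤ n := by simp at hf; omega
      have step : PySem.Chars.replace.go [x] new (n+1) (c :: t) acc
          = if [x].isPrefixOf (c :: t)
            then PySem.Chars.replace.go [x] new n (List.drop [x].length (c :: t)) (new.reverse ++ acc)
            else PySem.Chars.replace.go [x] new n t (c :: acc) := rfl
      rw [step]
      by_cases hc : c = x
      · subst hc
        rw [if_pos (by simp [List.isPrefixOf_iff_prefix])]
        simp only [List.length_cons, List.length_nil, List.drop_succ_cons, List.drop_zero]
        rw [ih t (new.reverse ++ acc) hf']
        simp
      · rw [if_neg (by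
          simp only [List.isPrefixOf_iff_prefix, List.cons_prefix_cons]
          exact fun hp => hc hp.1.symm)]
        rw [ih t (c :: acc) hf']
        simp [hc]

theorem replace_single (x : Char) (new : List Char) (l : List Char) :
    PySem.Chars.replace l [x] new = l.flatMap (fun c => if c = x then new else [c]) := by
  simp only [PySem.Chars.replace, List.isEmpty_cons, Bool.false_eq_true, if_false]
  exact replace_single_go x new l.length l [] le_rfl

theorem dropWhile_nospace (l : List Char) (h : ∀ c ∈ l, PySem.Chars.isspace c = false) :
    l.dropWhile PySem.Chars.isspace = l := by
  cases l with
  | nil => rfl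
  | cons c t => simp [h c (by simp)]

theorem strip_nospace (l : List Char) (h : ∀ c ∈ l, PySem.Chars.isspace c = false) :
    PySem.Chars.strip l = l := by
  simp [PySem.Chars.strip, PySem.Chars.lstrip, PySem.Chars.rstrip,
    dropWhile_nospace l h, dropWhile_nospace l.reverse (by simpa using h)]

theorem alnum_filter_all (l : List Char) :
    (l.filter (fun c => c != '_')).all PySem.Chars.isalnum
      = l.all (fun c => PySem.Chars.isalnum c || c == '_') := by
  induction l with
  | nil => rfl
  | cons c t ih =>
    by_cases hc : c = '_'
    · subst hc
      simp [ih, show PySem.Chars.isalnum '_' = false from by decide]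
    · have hb : (c == '_') = false := by simpa using hc
      simp [hb, hc, ih]

theorem alnum_filter (l : List Char) :
    PySem.Chars.strIsalnum (l.filter (fun c => c != '_'))
      = (l.all (fun c => PySem.Chars.isalnum c || c == '_') && l.any PySem.Chars.isalnum) := by
  induction l with
  | nil => rfl
  | cons c t ih =>
    by_cases hc : c = '_'
    · subst hc
      simp only [List.filter_cons, show (('_' : Char) != '_') = false from by decide,
        Bool.false_eq_true, if_false, List.all_cons, List.any_cons,
        show PySem.Chars.isalnum '_' = false from by decide, Bool.false_or, ih]
      simp
    · have hb : (c != '_') = true := by simpa using hc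
      by_cases ha : PySem.Chars.isalnum c
      · have hl : PySem.Chars.strIsalnum (c :: List.filter (fun c => c != '_') t)
            = (PySem.Chars.isalnum c && (List.filter (fun c => c != '_') t).all PySem.Chars.isalnum) := by
          simp [PySem.Chars.strIsalnum]
        rw [List.filter_cons, if_pos hb, hl, alnum_filter_all, List.all_cons, List.any_cons, ha]
        simp
      · have ha' : PySem.Chars.isalnum c = false := by simpa using ha
        have hbe : (c == '_') = false := by simpa using hc
        simp [hb, PySem.Chars.strIsalnum, ha', hbe]

theorem flatMap_underscore (l : List Char) :
    l.flatMap (fun c => if c = '_' then [] else [c]) = l.filter (fun c => c != '_') := by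
  induction l with
  | nil => rfl
  | cons c t ih =>
    by_cases hc : c = '_' <;> simp [hc, ih]

theorem aBad_body (body : List Char) :
    aBad ('.' :: body) = !(body.all (fun c => PySem.Chars.isalnum c || c == '_')
                            && body.any PySem.Chars.isalnum) := by
  cases body with
  | nil => decide
  | cons c t =>
    have h2 : ¬ (((('.' :: c :: t).length : Nat) : Int) < 2) := by
      have : ('.' :: c :: t).length = t.length + 2 := by simp
      rw [this]; push_cast; omega
    simp only [aBad, List.tail_cons, replace_single, flatMap_underscore, alnum_filter,
      decide_eq_false h2, Bool.false_or]

theorem head_startswith (cur : List Char) :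
    PySem.Chars.startswith cur ['.'] = (cur.head? == some '.') := by
  cases cur with
  | nil => rfl
  | cons c t =>
    have h0 : ['.'].isPrefixOf (c :: t) = ('.' == c && List.isPrefixOf [] t) := rfl
    have h3 : List.isPrefixOf ([] : List Char) t = true := rfl
    by_cases hc : c = '.'
    · subst hc; simp [PySem.Chars.startswith, h0, h3]
    · have h1 : (('.' : Char) == c) = false := by simpa using (Ne.symm hc)
      have h2 : (c == '.') = false := by simpa using hc
      simp [PySem.Chars.startswith, h0, h1, h2]

theorem aBad_flags (cur : List Char) :
    aBad (if PySem.Chars.startswith cur ['.'] then cur else '.' :: cur)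
      = !(vOk cur && vAl cur) := by
  cases cur with
  | nil => decide
  | cons c t =>
    rw [head_startswith]
    by_cases hc : c = '.'
    · subst hc
      simp only [List.head?_cons, show ((some '.' == some '.') = true) from by decide, if_true]
      rw [aBad_body]
      unfold vOk vAl vBody
      simp
    · have hb : (((c :: t).head?) == some '.') = false := by simp [hc]
      simp only [hb, Bool.false_eq_true, if_false]
      rw [aBad_body]
      unfold vOk vAl vBody
      simp only [hb, Bool.false_eq_true, if_false, List.all_cons, List.any_cons]

theorem vBody_append (cur : List Char) (d : Char) (h : cur ≠ []) :
    vBody (cur ++ [d]) = vBody cur ++ [d] := by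
  cases cur with
  | nil => simp at h
  | cons c t =>
    unfold vBody
    by_cases hc : c = '.' <;> simp [hc]

theorem flags_step (cur : List Char) (d : Char) :
    (if !cur.isEmpty || d != '.' then
        if PySem.Chars.isalnum d then (vOk cur, true)
        else if d == '_' then (vOk cur, vAl cur)
        else (false, vAl cur)
      else (vOk cur, vAl cur))
      = (vOk (cur ++ [d]), vAl (cur ++ [d])) := by
  cases cur with
  | nil =>
    by_cases hd : d = '.'
    · subst hd; simp [vOk, vAl, vBody]
    · have hne : (d == '.') = false := by simpa using hd
      by_cases ha : PySem.Chars.isalnum d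
      · have hu : (d == '_') = false := by
          have : d ≠ '_' := fun h => by subst h; exact absurd ha (by decide)
          simpa using this
        simp [vOk, vAl, vBody, hne, ha, hu, hd]
      · have ha' : PySem.Chars.isalnum d = false := by simpa using ha
        by_cases hu : d = '_'
        · subst hu; simp [vOk, vAl, vBody, ha']
        · have hu' : (d == '_') = false := by simpa using hu
          simp [vOk, vAl, vBody, hne, ha', hu', hd]
  | cons c t =>
    have hb := vBody_append (c :: t) d (by simp)
    have hOk : vOk ((c :: t) ++ [d]) = (vOk (c :: t) && (PySem.Chars.isalnum d || d == '_')) := by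
      unfold vOk; rw [hb]; simp [List.all_append]
    have hAl : vAl ((c :: t) ++ [d]) = (vAl (c :: t) || PySem.Chars.isalnum d) := by
      unfold vAl; rw [hb]; simp [List.any_append]
    simp only [List.isEmpty_cons, Bool.not_false, Bool.true_or, if_true, hOk, hAl]
    by_cases ha : PySem.Chars.isalnum d
    · have hu : (d == '_') = false := by
        have : d ≠ '_' := fun h => by subst h; exact absurd ha (by decide)
        simpa using this
      simp [ha]
    · have ha' : PySem.Chars.isalnum d = false := by simpa using ha
      by_cases hu : d = '_'
      · subst hu; simp [ha']
      · have hu' : (d == '_') = false := by simpa using hu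
        simp [ha', hu']

theorem sep_fComma (c : Char) :
    PySem.Chars.isspace (fComma c) = (PySem.Chars.isspace c || c == ',') := by
  by_cases hc : c = ','
  · subst hc; decide
  · have hb : (c == ',') = false := by simpa using hc
    simp [fComma, hc, hb]

theorem vbLoop_eq_vS (cs : List Char) (cur : List Char) (exts : List String) :
    vbLoop (cs ++ [' ']) exts cur (vOk cur) (vAl cur) = vS (cs.map fComma) cur exts := by
  induction cs generalizing cur exts with
  | nil =>
    simp only [List.nil_append, List.map_nil, vbLoop, vS,
      show (PySem.Chars.isspace ' ' || (' ' == ',')) = true from by decide, if_true]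
    by_cases hcur : cur.isEmpty
    · simp [hcur]
    · have hcur' : cur.isEmpty = false := by simpa using hcur
      simp only [hcur', Bool.not_false, if_true]
      rw [← aBad_flags cur, head_startswith]
      split_ifs with hbad <;> first | rfl | contradiction
  | cons c cs ih =>
    simp only [List.cons_append, List.map_cons, vbLoop, vS, sep_fComma]
    by_cases hsep : (PySem.Chars.isspace c || c == ',') = true
    · simp only [hsep, if_true]
      by_cases hcur : cur.isEmpty
      · have : cur = [] := by simpa using hcur
        subst this
        simp only [List.isEmpty_nil, Bool.not_true, Bool.false_eq_true, if_false, if_true]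
        exact ih [] exts
      · have hcur' : cur.isEmpty = false := by simpa using hcur
        simp only [hcur', Bool.not_false, if_true, Bool.false_eq_true, if_false]
        rw [← aBad_flags cur, head_startswith]
        split_ifs with hbad <;> first | rfl | contradiction | exact ih [] _
    · have hsep' : (PySem.Chars.isspace c || c == ',') = false := by simpa using hsep
      simp only [hsep', Bool.false_eq_true, if_false]
      rw [flags_step cur (PySem.Chars.lowerChar c)]
      have hcc : fComma c = c := by
        have : ¬ c = ',' := fun e => by subst e; simp at hsep'
        simp [fComma, this]
      rw [hcc]
      exact ih (cur ++ [PySem.Chars.lowerChar c]) exts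

theorem split₀_go_acc (l : List Char) (cur : List Char) (acc : List (List Char)) :
    PySem.Chars.split₀.go l cur acc = acc.reverse ++ PySem.Chars.split₀.go l cur [] := by
  induction l generalizing cur acc with
  | nil =>
    simp only [PySem.Chars.split₀.go]
    by_cases hcur : cur.isEmpty <;> simp [hcur]
  | cons c t ih =>
    simp only [PySem.Chars.split₀.go]
    by_cases hsp : PySem.Chars.isspace c
    · by_cases hcur : cur.isEmpty
      · simp only [hsp, hcur, if_true]
        exact ih [] acc
      · simp only [hsp, hcur, if_true, Bool.false_eq_true, if_false]
        rw [ih [] (cur.reverse :: acc), ih [] [cur.reverse]]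
        simp
    · simp only [hsp, Bool.false_eq_true, if_false]
      exact ih (c :: cur) acc

-- A's per-token normalization, on a whitespace-free token, is S's.
theorem extStr (l : List Char) (h : ∀ c ∈ l, PySem.Chars.isspace c = false) :
    (if !(PySem.Str.startswith (PySem.Str.lower (PySem.Str.strip (String.ofList l))) ".")
     then "." ++ PySem.Str.lower (PySem.Str.strip (String.ofList l))
     else PySem.Str.lower (PySem.Str.strip (String.ofList l)))
      = String.ofList (if PySem.Chars.startswith (PySem.Chars.lower l) ['.']
                       then PySem.Chars.lower l else '.' :: PySem.Chars.lower l) := by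
  have he : PySem.Str.lower (PySem.Str.strip (String.ofList l))
      = String.ofList (PySem.Chars.lower l) := by
    apply String.ext
    show (PySem.Str.lower (PySem.Str.strip (String.ofList l))).toList = _
    simp [strip_nospace l h]
  rw [he]
  have hsw : PySem.Str.startswith (String.ofList (PySem.Chars.lower l)) "."
      = PySem.Chars.startswith (PySem.Chars.lower l) ['.'] := by
    simp [PySem.Str.startswith_eq]
  rw [hsw]
  by_cases hs : PySem.Chars.startswith (PySem.Chars.lower l) ['.']
  · simp [hs]
  · simp only [hs, Bool.not_false, if_true, Bool.false_eq_true, if_false]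
    apply String.ext
    show ("." ++ String.ofList (PySem.Chars.lower l)).toList = _
    simp

theorem badStr (ext : List Char) :
    (decide (PySem.Str.len (String.ofList ext) < 2)
      || !(PySem.Str.strIsalnum (PySem.Str.replace (PySem.Str.slice (String.ofList ext) (some 1) none) "_" "")))
      = aBad ext := by
  have hsl : (PySem.Str.slice (String.ofList ext) (some 1) none).toList = ext.tail := by
    rw [PySem.Str.toList_slice, PySem.Chars.slice_eq_listSlice]
    simp [PySem.List.slice_from_one]
  have hu : ("_" : String).toList = ['_'] := by decide
  have he : ("" : String).toList = [] := by decide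
  have h2 : (PySem.Str.replace (PySem.Str.slice (String.ofList ext) (some 1) none) "_" "").toList
      = PySem.Chars.replace ext.tail ['_'] [] := by
    rw [PySem.Str.toList_replace, hsl, hu, he]
  have h1 : PySem.Str.len (String.ofList ext) = ((ext.length : Nat) : Int) := by simp
  unfold aBad
  rw [h1, PySem.Str.strIsalnum_eq, h2]

-- A side: the token loop over split₀'s output is the reference machine.
theorem vaLoopA_eq_vS (cs : List Char) (rcur : List Char) (exts : List String)
    (h : ∀ c ∈ rcur, PySem.Chars.isspace c = false) :
    vaLoopA ((PySem.Chars.split₀.go cs rcur []).map String.ofList) exts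
      = vS cs (PySem.Chars.lower rcur.reverse) exts := by
  induction cs generalizing rcur exts with
  | nil =>
    by_cases hcur : rcur.isEmpty
    · have : rcur = [] := by simpa using hcur
      subst this
      simp [PySem.Chars.split₀.go, vaLoopA, vS, PySem.Chars.lower]
    · have hcur' : rcur.isEmpty = false := by simpa using hcur
      have hre : (PySem.Chars.lower rcur.reverse).isEmpty = false := by
        simp [PySem.Chars.lower]
        simpa using hcur
      simp only [PySem.Chars.split₀.go, hcur', Bool.false_eq_true, if_false,
        List.reverse_nil, List.reverse_cons, List.nil_append, List.map_cons, List.map_nil,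
        vaLoopA, vS, hre]
      rw [extStr rcur.reverse (by simpa using h), badStr]
  | cons c cs ih =>
    by_cases hsp : PySem.Chars.isspace c = true
    · by_cases hcur : rcur.isEmpty
      · have : rcur = [] := by simpa using hcur
        subst this
        rw [show PySem.Chars.split₀.go (c :: cs) ([] : List Char) []
            = PySem.Chars.split₀.go cs [] [] from by simp [PySem.Chars.split₀.go, hsp],
          show vS (c :: cs) (PySem.Chars.lower ([] : List Char).reverse) exts
            = vS cs [] exts from by simp [vS, hsp, PySem.Chars.lower]]
        exact ih [] exts (by simp)
      · have hcur' : rcur.isEmpty = false := by simpa using hcur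
        have hre : (PySem.Chars.lower rcur.reverse).isEmpty = false := by
          simp [PySem.Chars.lower]
          simpa using hcur
        rw [show PySem.Chars.split₀.go (c :: cs) rcur [] = PySem.Chars.split₀.go cs [] [rcur.reverse] from by
          simp [PySem.Chars.split₀.go, hsp, hcur']]
        rw [split₀_go_acc cs [] [rcur.reverse]]
        simp only [List.reverse_cons, List.reverse_nil, List.nil_append, List.map_cons,
          List.singleton_append, vaLoopA, vS, hsp, if_true, hre, Bool.false_eq_true, if_false]
        rw [extStr rcur.reverse (by simpa using h), badStr]
        split_ifs with hbad <;> first | rfl | contradiction | exact ih [] _ (by simp)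
    · have hsp' : PySem.Chars.isspace c = false := by simpa using hsp
      simp only [PySem.Chars.split₀.go, hsp', Bool.false_eq_true, if_false, vS]
      have hl : PySem.Chars.lower ((c :: rcur).reverse)
          = PySem.Chars.lower rcur.reverse ++ [PySem.Chars.lowerChar c] := by
        simp [PySem.Chars.lower]
      rw [← hl]
      exact ih (c :: rcur) exts (by
        intro x hx
        rcases List.mem_cons.mp hx with h1 | h2
        · subst h1; exact hsp'
        · exact h x h2)

-- ===== VERDICT (by name: the statement is the Claim_ definition above) =====
theorem validate_extensions_spec : Claim_equal_validate_extensions := by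
  intro s _
  unfold Spec_validate_extensions validate_extensions validate_extensions_alt
  by_cases h : PySem.Str.strip s = ""
  · rw [if_pos h, if_pos h]
  · rw [if_neg h, if_neg h]
    show vaLoopA (PySem.Str.split₀ (PySem.Str.replace s "," " ")) []
        = vbLoop (s.toList ++ [' ']) [] [] true false
    have hflat : (PySem.Str.replace s "," " ").toList = s.toList.map fComma := by
      have hx : (PySem.Str.replace s "," " ").toList
          = PySem.Chars.replace s.toList [','] [' '] := by simp
      rw [hx, replace_single]
      induction s.toList with
      | nil => rfl
      | cons c t ih =>
        by_cases hc : c = ',' <;> simp [fComma, hc, ih]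
    have hid : ∀ (t : String), String.ofList t.toList = t := fun t => by
      apply String.ext
      show (String.ofList t.toList).toList = t.toList
      simp
    have h1 := PySem.Str.split₀_map_toList (PySem.Str.replace s "," " ")
    have h2 := congrArg (List.map String.ofList) h1
    rw [List.map_map, show String.ofList ∘ String.toList = id from funext hid,
      List.map_id] at h2
    rw [hflat] at h2
    rw [show PySem.Str.split₀ (PySem.Str.replace s "," " ")
        = (PySem.Chars.split₀.go (s.toList.map fComma) [] []).map String.ofList from h2]
    rw [vaLoopA_eq_vS (s.toList.map fComma) [] [] (by simp),
      show vbLoop (s.toList ++ [' ']) [] [] true false = vS (s.toList.map fComma) [] []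
        from vbLoop_eq_vS s.toList [] []]
    simp [PySem.Chars.lower]
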